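-- pv_equiv track=rewrite | github.com/jac08h/ChatbotChambers | backend/lmparlor/openrouter.py | _split_content_and_thinking
-- ===== SOURCE A (Python) =====
-- from typing import AsyncGenerator, List, Tuple
--
-- def _split_content_and_thinking(raw_content: str) -> Tuple[str, str]:
--     visible_parts: List[str] = []
--     first_thinking = ""
--     thinking_parts: List[str] = []
--     inside_think = False
--     index = 0
--
--     while index < len(raw_content):
--         if raw_content.startswith("<think>", index):
--             inside_think = True
--             thinking_parts = []
--             index += len("<think>")
--             continue
--         if raw_content.startswith("</think>", index):
--             if inside_think and not first_thinking:
--                 first_thinking = "".join(thinking_parts).strip()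
--             inside_think = False
--             thinking_parts = []
--             index += len("</think>")
--             continue
--
--         character = raw_content[index]
--         if inside_think:
--             thinking_parts.append(character)
--         else:
--             visible_parts.append(character)
--         index += 1
--
--     return "".join(visible_parts).strip(), first_thinking
-- ===== SOURCE B (Python) =====
-- def _split_content_and_thinking(raw_content):
--     visible_parts = []
--     first_thinking = ""
--     thinking_parts = []
--     inside_think = False
--     index = 0
--     while True:
--         o = raw_content.find("<think>", index)
--         c = raw_content.find("</think>", index)
--         if o == -1 and c == -1:
--             segment = raw_content[index:]
--             (thinking_parts if inside_think else visible_parts).append(segment)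
--             break
--         if o != -1 and (c == -1 or o < c):
--             tag, is_open = o, True
--         else:
--             tag, is_open = c, False
--         segment = raw_content[index:tag]
--         (thinking_parts if inside_think else visible_parts).append(segment)
--         if is_open:
--             inside_think = True
--             thinking_parts = []
--             index = tag + len("<think>")
--         else:
--             if inside_think and not first_thinking:
--                 first_thinking = "".join(thinking_parts).strip()
--             inside_think = False
--             thinking_parts = []
--             index = tag + len("</think>")
--     return "".join(visible_parts).strip(), first_thinking
-- ===== Notes on version B (the rewrite author's own statement) =====
-- stated objective: faster
-- what changed: A walks the string character by character, appending single characters to Python lists; B scans by spans: it uses str.find to locate the next opening or closing think-tag and appends whole slices between tags, so the per-character interpreted loop disappears.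
import Mathlib
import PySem

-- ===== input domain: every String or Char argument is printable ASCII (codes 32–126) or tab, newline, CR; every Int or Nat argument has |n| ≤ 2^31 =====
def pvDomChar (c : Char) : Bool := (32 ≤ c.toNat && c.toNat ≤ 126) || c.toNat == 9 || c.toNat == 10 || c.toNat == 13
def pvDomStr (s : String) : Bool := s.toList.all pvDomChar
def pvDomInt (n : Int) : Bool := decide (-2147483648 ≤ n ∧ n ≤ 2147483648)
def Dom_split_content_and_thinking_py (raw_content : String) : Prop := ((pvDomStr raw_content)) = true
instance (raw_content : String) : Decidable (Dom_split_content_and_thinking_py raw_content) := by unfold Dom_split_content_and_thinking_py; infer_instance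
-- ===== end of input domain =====

-- B replaces A's char-by-char state machine by a span scanner (find next tag, append whole slices); same return value, measurably faster in Python.


-- ===== PORT A =====
def pvOpenT : List Char := ['<', 't', 'h', 'i', 'n', 'k', '>']     -- "<think>"
def pvCloseT : List Char := ['<', '/', 't', 'h', 'i', 'n', 'k', '>'] -- "</think>"

-- A's while loop over the index, as structural recursion on the remaining suffix;
-- vis/first/thk are A's visible_parts / first_thinking / thinking_parts (chars), inside = inside_think.
def pvALoop : List Char → List Char → List Char → List Char → Bool → String × String
  | [], vis, first, _, _ => (String.ofList (PySem.Chars.strip vis), String.ofList first)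
  | ch :: rest, vis, first, thk, inside =>
    if PySem.Chars.startswith (ch :: rest) pvOpenT then
      pvALoop (List.drop 7 (ch :: rest)) vis first [] true
    else if PySem.Chars.startswith (ch :: rest) pvCloseT then
      pvALoop (List.drop 8 (ch :: rest)) vis
        (if inside && first == [] then PySem.Chars.strip thk else first) [] false
    else
      pvALoop rest (if inside then vis else vis ++ [ch]) first
        (if inside then thk ++ [ch] else thk) inside
  termination_by l => l.length
  decreasing_by all_goals simp [List.length_drop]; try omega

def split_content_and_thinking_py (raw_content : String) : String × String :=
  pvALoop raw_content.toList [] [] [] false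

-- ===== PORT B =====
-- B's span scanner: o/c are raw.find("<think>", i) / raw.find("</think>", i), taken relative
-- to the remaining suffix l = raw[i:]; the nearest tag is handled, the slice before it appended whole.
def pvBLoop : List Char → List Char → List Char → List Char → Bool → String × String
  | [], vis, first, _, _ => (String.ofList (PySem.Chars.strip vis), String.ofList first)
  | ch :: rest, vis, first, thk, inside =>
    let o := PySem.Chars.find (ch :: rest) pvOpenT
    let c := PySem.Chars.find (ch :: rest) pvCloseT
    if o = -1 ∧ c = -1 then
      (String.ofList (PySem.Chars.strip (if inside then vis else vis ++ (ch :: rest))), String.ofList first)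
    else if o ≠ -1 ∧ (c = -1 ∨ o < c) then
      pvBLoop (List.drop (o.toNat + 7) (ch :: rest))
        (if inside then vis else vis ++ List.take o.toNat (ch :: rest)) first [] true
    else
      pvBLoop (List.drop (c.toNat + 8) (ch :: rest))
        (if inside then vis else vis ++ List.take c.toNat (ch :: rest))
        (if inside && first == [] then
          PySem.Chars.strip (if inside then thk ++ List.take c.toNat (ch :: rest) else thk)
         else first)
        [] false
  termination_by l => l.length
  decreasing_by all_goals simp [List.length_drop]; try omega

def split_content_and_thinking_py_alt (raw_content : String) : String × String :=
  pvBLoop raw_content.toList [] [] [] false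

-- ===== PRECONDITION & SPEC =====
def Spec_split_content_and_thinking_py (raw_content : String) (out : String × String) : Prop := out = split_content_and_thinking_py_alt raw_content
instance (raw_content : String) (out : String × String) : Decidable (Spec_split_content_and_thinking_py raw_content out) := by unfold Spec_split_content_and_thinking_py; infer_instance

-- ===== CLAIM (what is proved, stated in full; the proofs are below) =====
def Claim_equal_split_content_and_thinking_py : Prop := ∀ (raw_content : String), Dom_split_content_and_thinking_py raw_content → Spec_split_content_and_thinking_py raw_content (split_content_and_thinking_py raw_content)

-- ===== LEMMAS AND PROOFS =====

lemma pvNoPrefix_of_find_neg {s sub : List Char} (h : PySem.Chars.find s sub = -1) :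
    ∀ j, ¬ sub <+: s.drop j := by
  intro j hpre
  have : PySem.Chars.isIn sub s = true :=
    (PySem.Chars.exists_prefix_drop_iff_isIn sub s).mp ⟨j, hpre⟩
  have hin := (PySem.Chars.isIn_iff_infix sub s).mp this
  exact (PySem.Chars.find_eq_neg_one_iff s sub).mp h hin

lemma pvConsume (j : Nat) : ∀ (l vis first thk : List Char) (inside : Bool),
    (∀ k, k < j → ¬ pvOpenT <+: l.drop k ∧ ¬ pvCloseT <+: l.drop k) →
    pvALoop l vis first thk inside =
      pvALoop (l.drop j) (if inside then vis else vis ++ l.take j) first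
        (if inside then thk ++ l.take j else thk) inside := by
  induction j with
  | zero => intro l vis first thk inside _; cases inside <;> simp
  | succ j ih =>
    intro l vis first thk inside h
    cases l with
    | nil => cases inside <;> simp
    | cons ch rest =>
      have h0 := h 0 (Nat.succ_pos j)
      simp only [List.drop_zero] at h0
      have hsw1 : PySem.Chars.startswith (ch :: rest) pvOpenT = false := by
        rw [Bool.eq_false_iff]; intro hc; exact h0.1 ((PySem.Chars.startswith_iff _ _).mp hc)
      have hsw2 : PySem.Chars.startswith (ch :: rest) pvCloseT = false := by
        rw [Bool.eq_false_iff]; intro hc; exact h0.2 ((PySem.Chars.startswith_iff _ _).mp hc)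
      rw [pvALoop, hsw1, hsw2]
      simp only [Bool.false_eq_true, if_false]
      rw [ih rest _ first _ inside (fun k hk => h (k+1) (by omega))]
      cases inside <;> simp

lemma pvALoop_open (s' vis first thk : List Char) (inside : Bool) :
    pvALoop (pvOpenT ++ s') vis first thk inside = pvALoop s' vis first [] true := by
  have hsw : PySem.Chars.startswith ('<'::'t'::'h'::'i'::'n'::'k'::'>'::s') pvOpenT = true := by
    rw [PySem.Chars.startswith_iff]; exact ⟨s', rfl⟩
  show pvALoop ('<'::'t'::'h'::'i'::'n'::'k'::'>'::s') vis first thk inside = _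
  rw [pvALoop, hsw]
  simp [List.drop]

lemma pvALoop_close (s' vis first thk : List Char) (inside : Bool) :
    pvALoop (pvCloseT ++ s') vis first thk inside =
      pvALoop s' vis (if inside && first == [] then PySem.Chars.strip thk else first) [] false := by
  have hsw1 : PySem.Chars.startswith ('<'::'/'::'t'::'h'::'i'::'n'::'k'::'>'::s') pvOpenT = false := by
    simp [PySem.Chars.startswith, pvOpenT, List.isPrefixOf]
  have hsw2 : PySem.Chars.startswith ('<'::'/'::'t'::'h'::'i'::'n'::'k'::'>'::s') pvCloseT = true := by
    rw [PySem.Chars.startswith_iff]; exact ⟨s', rfl⟩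
  show pvALoop ('<'::'/'::'t'::'h'::'i'::'n'::'k'::'>'::s') vis first thk inside = _
  rw [pvALoop, hsw1, hsw2]
  simp [List.drop]

lemma pvMain : ∀ (n : Nat) (l : List Char), l.length ≤ n → ∀ (vis first thk : List Char) (inside : Bool),
    pvALoop l vis first thk inside = pvBLoop l vis first thk inside := by
  intro n
  induction n with
  | zero =>
    intro l hl vis first thk inside
    have : l = [] := List.eq_nil_of_length_eq_zero (Nat.le_zero.mp hl)
    subst this; rw [pvALoop, pvBLoop]
  | succ n ih =>
    intro l hl vis first thk inside
    cases l with
    | nil => rw [pvALoop, pvBLoop]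
    | cons ch rest =>
      have hl' : rest.length + 1 ≤ n + 1 := by simpa using hl
      by_cases hnone : PySem.Chars.find (ch :: rest) pvOpenT = -1 ∧ PySem.Chars.find (ch :: rest) pvCloseT = -1
      · have hno : ∀ k, k < (ch :: rest).length →
            ¬ pvOpenT <+: (ch :: rest).drop k ∧ ¬ pvCloseT <+: (ch :: rest).drop k :=
          fun k _ => ⟨pvNoPrefix_of_find_neg hnone.1 k, pvNoPrefix_of_find_neg hnone.2 k⟩
        rw [pvConsume (ch :: rest).length _ _ _ _ _ hno, List.drop_length, List.take_length,
            pvALoop, pvBLoop]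
        simp only [if_pos hnone]
      · by_cases hopen : PySem.Chars.find (ch :: rest) pvOpenT ≠ -1 ∧
            (PySem.Chars.find (ch :: rest) pvCloseT = -1 ∨
              PySem.Chars.find (ch :: rest) pvOpenT < PySem.Chars.find (ch :: rest) pvCloseT)
        · -- nearest tag is "<think>"
          have hom1 : (-1 : Int) ≤ PySem.Chars.find (ch :: rest) pvOpenT :=
            PySem.Chars.neg_one_le_find _ _
          have ho0 : (0 : Int) ≤ PySem.Chars.find (ch :: rest) pvOpenT := by
            have := hopen.1; omega
          have hspec := PySem.Chars.find_spec (s := ch :: rest) (sub := pvOpenT) ho0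
          have hcmin : ∀ k, k < (PySem.Chars.find (ch :: rest) pvOpenT).toNat →
              ¬ pvCloseT <+: (ch :: rest).drop k := by
            rcases hopen.2 with hc | hlt
            · exact fun k _ => pvNoPrefix_of_find_neg hc k
            · have hc0 : (0 : Int) ≤ PySem.Chars.find (ch :: rest) pvCloseT := by omega
              have hcspec := PySem.Chars.find_spec (s := ch :: rest) (sub := pvCloseT) hc0
              exact fun k hk => hcspec.2 k (by omega)
          rw [pvConsume (PySem.Chars.find (ch :: rest) pvOpenT).toNat _ _ _ _ _
                (fun k hk => ⟨hspec.2 k hk, hcmin k hk⟩)]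
          obtain ⟨s', hs'⟩ := hspec.1
          rw [← hs', pvALoop_open]
          have hs'' : (ch :: rest).drop ((PySem.Chars.find (ch :: rest) pvOpenT).toNat + 7) = s' := by
            have h7 := congrArg (List.drop 7) hs'
            simpa [List.drop_drop, List.drop_left' (show pvOpenT.length = 7 from rfl), Nat.add_comm] using h7.symm
          rw [← hs'', ih _ (by simp [List.length_drop]; omega)]
          rw [pvBLoop]
          simp only [if_neg hnone, if_pos hopen]
        · -- nearest tag is "</think>"
          have hc_ne : PySem.Chars.find (ch :: rest) pvCloseT ≠ -1 := by
            intro hc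
            rcases Decidable.em (PySem.Chars.find (ch :: rest) pvOpenT = -1) with ho | ho
            · exact hnone ⟨ho, hc⟩
            · exact hopen ⟨ho, Or.inl hc⟩
          have hc0 : (0 : Int) ≤ PySem.Chars.find (ch :: rest) pvCloseT := by
            have := PySem.Chars.neg_one_le_find (ch :: rest) pvCloseT; omega
          have hcspec := PySem.Chars.find_spec (s := ch :: rest) (sub := pvCloseT) hc0
          have homin : ∀ k, k < (PySem.Chars.find (ch :: rest) pvCloseT).toNat →
              ¬ pvOpenT <+: (ch :: rest).drop k := by
            rcases Decidable.em (PySem.Chars.find (ch :: rest) pvOpenT = -1) with ho | ho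
            · exact fun k _ => pvNoPrefix_of_find_neg ho k
            · have hle : PySem.Chars.find (ch :: rest) pvCloseT ≤
                  PySem.Chars.find (ch :: rest) pvOpenT := by
                rcases Decidable.em (PySem.Chars.find (ch :: rest) pvOpenT <
                    PySem.Chars.find (ch :: rest) pvCloseT) with hlt | hnlt
                · exact absurd ⟨ho, Or.inr hlt⟩ hopen
                · omega
              have ho0 : (0 : Int) ≤ PySem.Chars.find (ch :: rest) pvOpenT := by omega
              have hospec := PySem.Chars.find_spec (s := ch :: rest) (sub := pvOpenT) ho0
              exact fun k hk => hospec.2 k (by omega)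
          rw [pvConsume (PySem.Chars.find (ch :: rest) pvCloseT).toNat _ _ _ _ _
                (fun k hk => ⟨homin k hk, hcspec.2 k hk⟩)]
          obtain ⟨s', hs'⟩ := hcspec.1
          rw [← hs', pvALoop_close]
          have hs'' : (ch :: rest).drop ((PySem.Chars.find (ch :: rest) pvCloseT).toNat + 8) = s' := by
            have h8 := congrArg (List.drop 8) hs'
            simpa [List.drop_drop, List.drop_left' (show pvCloseT.length = 8 from rfl), Nat.add_comm] using h8.symm
          rw [← hs'', ih _ (by simp [List.length_drop]; omega)]
          rw [pvBLoop]
          simp only [if_neg hnone, if_neg hopen]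

-- ===== VERDICT (by name: the statement is the Claim_ definition above) =====
theorem split_content_and_thinking_py_spec : Claim_equal_split_content_and_thinking_py := by
  intro raw _
  unfold Spec_split_content_and_thinking_py split_content_and_thinking_py split_content_and_thinking_py_alt
  exact pvMain raw.toList.length raw.toList le_rfl [] [] [] false
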